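-- pv_equiv track=rewrite | github.com/nguyentran6698/LC_Practice | contest/weekly326/2.py | solution
-- ===== SOURCE A (Python) =====
-- def solution(nums):
--     s = set()
--
--     def is_prime(num):
--         if num == 0 or num == 1:
--             return False
--         for x in range(2, num):
--             if num % x == 0:
--                 return False
--         else:
--             return True
--
--     primes = list(filter(is_prime, range(1, 1000)))
--     for num in nums:
--         for prime in primes:
--             if num % prime == 0:
--                 s.add(prime)
--     return len(s)
-- ===== SOURCE B (Python) =====
-- def solution(nums):
--     def is_prime(num):
--         if num == 0 or num == 1:
--             return False
--         for x in range(2, num):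
--             if num % x == 0:
--                 return False
--         return True
--
--     primes = [p for p in range(1, 1000) if is_prime(p)]
--     M = 1
--     for p in primes:
--         M *= p
--     prod = 1
--     for n in nums:
--         prod = prod * n % M
--     return sum(1 for p in primes if prod % p == 0)
-- ===== Notes on version B (the rewrite author's own statement) =====
-- stated objective: faster
-- what changed: B replaces A's nested nums-x-primes loop that accumulates a set with a single running product of nums reduced modulo the primorial of the primes below 1000, then one divisibility count over the primes (a prime p divides the product iff it divides some element, and reducing mod M with p | M preserves divisibility by p).
import Mathlib
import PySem

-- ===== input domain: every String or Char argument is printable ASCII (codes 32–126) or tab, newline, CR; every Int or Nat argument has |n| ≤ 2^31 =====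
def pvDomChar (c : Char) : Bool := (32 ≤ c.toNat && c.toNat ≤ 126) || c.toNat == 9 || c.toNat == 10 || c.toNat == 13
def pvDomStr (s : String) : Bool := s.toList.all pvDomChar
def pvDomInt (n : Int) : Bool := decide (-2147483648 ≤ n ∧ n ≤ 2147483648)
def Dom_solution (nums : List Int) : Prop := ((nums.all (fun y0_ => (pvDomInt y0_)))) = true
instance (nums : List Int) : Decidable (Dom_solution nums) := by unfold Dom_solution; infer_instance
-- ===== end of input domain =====

-- ===== PORT A =====
-- B counts via one running product of nums reduced mod the primorial of the primes < 1000, instead of A's nested loop building a set (objective: faster, measured).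
-- helper: A's (and B's) trial-division primality test, 'for x in range(2, num)' with early False
def pvIsPrime (num : Int) : Bool :=
  if num == 0 || num == 1 then false
  else (PySem.List.pyRange 2 num 1).all (fun x => !(PySem.Int.mod num x == 0))

def solution (nums : List Int) : Int :=
  let primes := (PySem.List.pyRange 1 1000 1).filter pvIsPrime
  let s : PySem.Set Int := nums.foldl (fun s num =>
    primes.foldl (fun s prime =>
      if PySem.Int.mod num prime == 0 then PySem.Set.add s prime else s) s) PySem.Set.empty
  (s.length : Int)

-- ===== PORT B =====
def solution_alt (nums : List Int) : Int :=
  let primes := (PySem.List.pyRange 1 1000 1).filter pvIsPrime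
  let M := primes.foldl (fun a b => a * b) 1
  let prod := nums.foldl (fun a b => PySem.Int.mod (a * b) M) 1
  ((primes.filter (fun p => PySem.Int.mod prod p == 0)).length : Int)

-- ===== PRECONDITION & SPEC =====
def Spec_solution (nums : List Int) (out : Int) : Prop := out = solution_alt nums
instance (nums : List Int) (out : Int) : Decidable (Spec_solution nums out) := by unfold Spec_solution; infer_instance

-- ===== CLAIM (what is proved, stated in full; the proofs are below) =====
def Claim_equal_solution : Prop := ∀ (nums : List Int), Dom_solution nums → Spec_solution nums (solution nums)

-- ===== LEMMAS AND PROOFS =====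

-- inner loop: conditional set-insertion over a list
theorem pv_mem_foldl_addIf (c : Int → Bool) (l : List Int) (s : PySem.Set Int) (y : Int) :
    y ∈ l.foldl (fun s x => if c x then PySem.Set.add s x else s) s ↔
      y ∈ s ∨ (y ∈ l ∧ c y = true) := by
  induction l generalizing s with
  | nil => simp
  | cons x t ih =>
    simp only [List.foldl_cons, ih, List.mem_cons]
    split_ifs with hc
    · simp only [PySem.Set.mem_add]
      constructor
      · rintro ((h | h) | h)
        · exact Or.inl h
        · subst h; exact Or.inr ⟨Or.inl rfl, hc⟩
        · exact Or.inr ⟨Or.inr h.1, h.2⟩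
      · rintro (h | ⟨hx | hx, hcy⟩)
        · exact Or.inl (Or.inl h)
        · subst hx; exact Or.inl (Or.inr rfl)
        · exact Or.inr ⟨hx, hcy⟩
    · constructor
      · rintro (h | h)
        · exact Or.inl h
        · exact Or.inr ⟨Or.inr h.1, h.2⟩
      · rintro (h | ⟨hx | hx, hcy⟩)
        · exact Or.inl h
        · subst hx; exact absurd hcy (by simp [hc])
        · exact Or.inr ⟨hx, hcy⟩

theorem pv_nodup_foldl_addIf (c : Int → Bool) (l : List Int) (s : PySem.Set Int)
    (hs : s.Nodup) : (l.foldl (fun s x => if c x then PySem.Set.add s x else s) s).Nodup := by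
  induction l generalizing s with
  | nil => exact hs
  | cons x t ih =>
    simp only [List.foldl_cons]
    split_ifs
    · exact ih _ (PySem.Set.nodup_add s x hs)
    · exact ih _ hs

-- outer loop membership
theorem pv_mem_outer (primes : List Int) (nums : List Int) (s : PySem.Set Int) (y : Int) :
    y ∈ nums.foldl (fun s num =>
        primes.foldl (fun s prime =>
          if PySem.Int.mod num prime == 0 then PySem.Set.add s prime else s) s) s ↔
      y ∈ s ∨ (y ∈ primes ∧ ∃ n ∈ nums, PySem.Int.mod n y = 0) := by
  induction nums generalizing s with
  | nil => simp
  | cons n t ih =>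
    simp only [List.foldl_cons, ih, pv_mem_foldl_addIf]
    constructor
    · rintro ((h | ⟨hy, hc⟩) | ⟨hp, m, hm, hmod⟩)
      · exact Or.inl h
      · exact Or.inr ⟨hy, n, by simpa using hc⟩
      · exact Or.inr ⟨hp, m, List.mem_cons_of_mem _ hm, hmod⟩
    · rintro (h | ⟨hp, m, hm, hmod⟩)
      · exact Or.inl (Or.inl h)
      · rcases List.mem_cons.mp hm with h1 | h1
        · subst h1; exact Or.inl (Or.inr ⟨hp, by simpa using hmod⟩)
        · exact Or.inr ⟨hp, m, h1, hmod⟩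

theorem pv_nodup_outer (primes : List Int) (nums : List Int) (s : PySem.Set Int)
    (hs : s.Nodup) :
    (nums.foldl (fun s num =>
        primes.foldl (fun s prime =>
          if PySem.Int.mod num prime == 0 then PySem.Set.add s prime else s) s) s).Nodup := by
  induction nums generalizing s with
  | nil => exact hs
  | cons n t ih => exact ih _ (pv_nodup_foldl_addIf _ _ _ hs)

-- trial division is a primality test
theorem pv_isPrime_prime (p : Int) (h1 : 1 ≤ p) (hp : pvIsPrime p = true) : Prime p := by
  unfold pvIsPrime at hp
  split_ifs at hp with h0
  have h0' : ¬(p = 0 ∨ p = 1) := by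
    intro h; apply h0; rcases h with h | h <;> simp [h]
  have h2 : 2 ≤ p := by omega
  have hnd : ∀ x : Int, 2 ≤ x → x < p → ¬ x ∣ p := by
    intro x hx1 hx2 hdvd
    have hx : x ∈ PySem.List.pyRange 2 p 1 := (PySem.List.mem_pyRange_one).mpr ⟨hx1, hx2⟩
    have := List.all_eq_true.mp hp x hx
    rw [← PySem.Int.mod_eq_zero_iff_dvd] at hdvd
    simp [hdvd] at this
  rw [Int.prime_iff_natAbs_prime, Nat.prime_def_lt]
  have habs : (p.natAbs : Int) = p := Int.natAbs_of_nonneg (by omega)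
  constructor
  · omega
  · intro m hm hdvd
    by_contra hne
    have hm0 : m ≠ 0 := by
      intro h; subst h
      have : p.natAbs = 0 := Nat.eq_zero_of_zero_dvd hdvd
      omega
    have hm2 : 2 ≤ m := by omega
    have : (m : Int) ∣ p := by
      rw [← habs]; exact_mod_cast hdvd
    exact hnd m (by exact_mod_cast hm2) (by omega) this

-- fold is the product
theorem pv_foldl_mul (nums : List Int) : nums.foldl (fun a b => a * b) 1 = nums.prod := by
  rw [List.prod_eq_foldl]

-- one reduction step stays congruent mod M
theorem pv_redfold (M : Int) (nums : List Int) (a : Int) :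
    M ∣ (nums.foldl (fun a b => PySem.Int.mod (a * b) M) a - a * nums.prod) := by
  induction nums generalizing a with
  | nil => simp
  | cons n t ih =>
    simp only [List.foldl_cons, List.prod_cons]
    have h1 : M ∣ (PySem.Int.mod (a * n) M - a * n) := by
      have hfm := PySem.Int.floordiv_mul_add_mod (a * n) M
      exact ⟨-(PySem.Int.floordiv (a * n) M), by linarith⟩
    have h2 := ih (PySem.Int.mod (a * n) M)
    have h3 :
        t.foldl (fun a b => PySem.Int.mod (a * b) M) (PySem.Int.mod (a * n) M) - a * (n * t.prod) =
        (t.foldl (fun a b => PySem.Int.mod (a * b) M) (PySem.Int.mod (a * n) M) -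
            PySem.Int.mod (a * n) M * t.prod) +
          (PySem.Int.mod (a * n) M - a * n) * t.prod := by ring
    rw [h3]
    exact dvd_add h2 (h1.mul_right t.prod)

-- a prime dividing M divides the mod-M-reduced product iff it divides some element
theorem pv_prime_dvd_prod (p M : Int) (hp : Prime p) (hpM : p ∣ M) (nums : List Int) :
    PySem.Int.mod (nums.foldl (fun a b => PySem.Int.mod (a * b) M) 1) p = 0 ↔
      ∃ n ∈ nums, PySem.Int.mod n p = 0 := by
  rw [PySem.Int.mod_eq_zero_iff_dvd]
  have hd : p ∣ (nums.foldl (fun a b => PySem.Int.mod (a * b) M) 1 - nums.prod) := by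
    have := hpM.trans (pv_redfold M nums 1)
    simpa using this
  have key : p ∣ nums.foldl (fun a b => PySem.Int.mod (a * b) M) 1 ↔ p ∣ nums.prod := by
    constructor
    · intro h'
      have := dvd_sub h' hd
      simpa using this
    · intro h'
      have := dvd_add hd h'
      simpa using this
  rw [key, hp.dvd_prod_iff]
  constructor
  · rintro ⟨a, ha, hdv⟩
    exact ⟨a, ha, (PySem.Int.mod_eq_zero_iff_dvd a p).mpr hdv⟩
  · rintro ⟨a, ha, hdv⟩
    exact ⟨a, ha, (PySem.Int.mod_eq_zero_iff_dvd a p).mp hdv⟩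

-- main counting identity, for an abstract list of primes
theorem pv_main (primes nums : List Int) (hprime : ∀ p ∈ primes, Prime p)
    (hnd : primes.Nodup) :
    (nums.foldl (fun s num =>
        primes.foldl (fun s prime =>
          if PySem.Int.mod num prime == 0 then PySem.Set.add s prime else s) s)
      (PySem.Set.empty : PySem.Set Int)).length =
    (primes.filter (fun p =>
        PySem.Int.mod
          (nums.foldl (fun a b => PySem.Int.mod (a * b) (primes.foldl (fun a b => a * b) 1)) 1)
          p == 0)).length := by
  have hM : ∀ p ∈ primes, p ∣ primes.foldl (fun a b => a * b) 1 := by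
    intro p hp
    rw [pv_foldl_mul]
    exact List.dvd_prod hp
  apply List.Perm.length_eq
  rw [List.perm_ext_iff_of_nodup
      (pv_nodup_outer primes nums PySem.Set.empty (by simp [PySem.Set.empty]))
      (hnd.filter _)]
  intro y
  rw [pv_mem_outer, List.mem_filter]
  simp only [PySem.Set.empty, List.not_mem_nil, false_or]
  constructor
  · rintro ⟨hy, hex⟩
    exact ⟨hy, by simpa using (pv_prime_dvd_prod y _ (hprime y hy) (hM y hy) nums).mpr hex⟩
  · rintro ⟨hy, hc⟩
    exact ⟨hy, (pv_prime_dvd_prod y _ (hprime y hy) (hM y hy) nums).mp (by simpa using hc)⟩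

-- ===== VERDICT (by name: the statement is the Claim_ definition above) =====
theorem solution_spec : Claim_equal_solution := by
  intro nums _
  unfold Spec_solution solution solution_alt
  have hprime : ∀ p ∈ (PySem.List.pyRange 1 1000 1).filter pvIsPrime, Prime p := by
    intro p hp
    rw [List.mem_filter] at hp
    have h1 : 1 ≤ p := ((PySem.List.mem_pyRange_one).mp hp.1).1
    exact pv_isPrime_prime p h1 hp.2
  have hnd : ((PySem.List.pyRange 1 1000 1).filter pvIsPrime).Nodup :=
    List.Nodup.filter _ (PySem.List.nodup_pyRange_one 1 1000)
  exact congrArg Int.ofNat (pv_main _ nums hprime hnd)
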